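-- pv_equiv track=rewrite | github.com/bohdanvan/advent-of-code | src/advent_of_code_2024/day4/day4.py | to_asc_diagonals
-- ===== SOURCE A (Python) =====
-- from typing import List
--
-- def to_asc_diagonals(matrix: List[str]) -> List[str]:
--     res: List[List[str]] = []
--
--     diagonal: List[str]
--     for i_idx in range(0, len(matrix)):
--         diagonal = []
--         i, j = i_idx, 0
--         while is_valid_index(i, j, matrix):
--             diagonal.append(matrix[i][j])
--             i, j = i - 1, j + 1
--         res.append(diagonal)
--
--     for j_idx in range(1, len(matrix[0])):
--         diagonal = []
--         i, j = len(matrix) - 1, j_idx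
--         while is_valid_index(i, j, matrix):
--             diagonal.append(matrix[i][j])
--             i, j = i - 1, j + 1
--         res.append(diagonal)
--
--     return ["".join(row) for row in res]
--
-- def is_valid_index(i: int, j: int, matrix: List[str]) -> bool:
--     return i >= 0 and i < len(matrix) and j >= 0 and j < len(matrix[0])
-- ===== SOURCE B (Python) =====
-- from typing import List
--
-- def to_asc_diagonals(matrix: List[str]) -> List[str]:
--     rows = len(matrix)
--     cols = len(matrix[0])
--     # one diagonal per start cell: the left column (rows) plus the bottom row (cols - 1)
--     buckets: List[List[str]] = [[] for _ in range(rows + max(cols - 1, 0))]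
--     for i in range(rows - 1, -1, -1):
--         row = matrix[i]
--         for j in range(cols):
--             buckets[i + j].append(row[j])
--     return ["".join(b) for b in buckets]
-- ===== Notes on version B (the rewrite author's own statement) =====
-- stated objective: simpler
-- what changed: Replaces A's two families of per-diagonal up-right walks (a validity-checked while loop per start cell) by a single row-by-row bucketing pass keyed by diagonal number i+j, iterating rows bottom-up so each bucket fills in increasing-j order.
import Mathlib
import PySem

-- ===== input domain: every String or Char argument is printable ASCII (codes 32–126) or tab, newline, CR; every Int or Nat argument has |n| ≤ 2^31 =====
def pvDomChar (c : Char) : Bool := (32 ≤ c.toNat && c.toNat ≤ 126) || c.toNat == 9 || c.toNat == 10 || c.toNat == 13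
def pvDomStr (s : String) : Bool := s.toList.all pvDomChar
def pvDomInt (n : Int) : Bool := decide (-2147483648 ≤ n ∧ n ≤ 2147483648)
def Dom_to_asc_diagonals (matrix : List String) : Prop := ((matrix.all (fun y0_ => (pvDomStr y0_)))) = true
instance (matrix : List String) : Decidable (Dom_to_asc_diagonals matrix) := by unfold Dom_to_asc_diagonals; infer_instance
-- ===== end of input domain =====

-- B replaces A's per-diagonal up-right walks by one row-by-row bucketing pass keyed by i+j (objective: simpler).

-- ===== PORT A =====
def is_valid_index (i j : Int) (matrix : List String) : Bool :=
  decide (0 ≤ i) && decide (i < (matrix.length : Int)) && decide (0 ≤ j) &&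
    decide (j < ((matrix.headD "").toList.length : Int))

-- the while loop of A: walk up-right from (i, j); the .getD ' ' default is Python's
-- IndexError on ragged input, unreachable under Pre_
def walkA (matrix : List String) (i j : Int) : List Char :=
  if h : is_valid_index i j matrix = true then
    (((PySem.List.pyGet? matrix i).bind (fun row => PySem.Str.pyGet? row j)).getD ' ')
      :: walkA matrix (i - 1) (j + 1)
  else []
termination_by (i + 1).toNat
decreasing_by
  simp [is_valid_index] at h
  omega

def to_asc_diagonals (matrix : List String) : List String :=
  let res1 := (List.range matrix.length).map (fun (i_idx : Nat) => walkA matrix (i_idx : Int) 0)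
  let res2 := (PySem.List.pyRange 1 (((matrix.headD "").toList.length : Int)) 1).map
      (fun j_idx => walkA matrix ((matrix.length : Int) - 1) j_idx)
  (res1 ++ res2).map (fun row => String.ofList row)

-- ===== PORT B =====
-- single bucketing pass: rows bottom-up, buckets keyed by i+j; rows + (cols - 1) buckets
-- (Nat subtraction = Python's rows + max(cols-1, 0)); the defaults are
-- Python's IndexError on empty/ragged input, unreachable under Pre_
def to_asc_diagonals_alt (matrix : List String) : List String :=
  let rows := matrix.length
  let cols := (matrix.headD "").toList.length
  let buckets := (PySem.List.pyRange ((rows : Int) - 1) (-1) (-1)).foldl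
    (fun bs i =>
      let row := PySem.List.pyGetD matrix i ""
      (PySem.List.pyRange 0 (cols : Int) 1).foldl
        (fun bs2 j => bs2.modify (i + j).toNat
          (fun b => b ++ [(PySem.Str.pyGet? row j).getD ' '])) bs)
    (List.replicate (rows + (cols - 1)) ([] : List Char))
  buckets.map (fun b => String.ofList b)

-- ===== PRECONDITION & SPEC =====
-- Pre_ excludes exactly the inputs on which A raises IndexError: the empty matrix
-- (len(matrix[0])) and matrices with a row shorter than the first row (matrix[i][j]).
def Pre_to_asc_diagonals (matrix : List String) : Prop :=
  matrix ≠ [] ∧ ∀ s ∈ matrix, (matrix.headD "").toList.length ≤ s.toList.length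
instance (matrix : List String) : Decidable (Pre_to_asc_diagonals matrix) := by
  unfold Pre_to_asc_diagonals; infer_instance

def pvWitness_to_asc_diagonals : List String := ["ab", "cd"]

def Spec_to_asc_diagonals (matrix : List String) (out : List String) : Prop :=
  out = to_asc_diagonals_alt matrix
instance (matrix : List String) (out : List String) : Decidable (Spec_to_asc_diagonals matrix out) := by
  unfold Spec_to_asc_diagonals; infer_instance

-- ===== CLAIM (what is proved, stated in full; the proofs are below) =====
def Claim_equal_to_asc_diagonals : Prop := ∀ (matrix : List String), Dom_to_asc_diagonals matrix → Pre_to_asc_diagonals matrix → Spec_to_asc_diagonals matrix (to_asc_diagonals matrix)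

-- ===== LEMMAS AND PROOFS =====

-- character at (i, j); defaults unreachable in the uses below
def chAt (matrix : List String) (i j : Nat) : Char := ((matrix.getD i "").toList).getD j ' '

-- membership of row i in the diagonal numbered s
def ps (cols s i : Nat) : Bool := decide (i ≤ s ∧ s - i < cols)

-- the diagonal numbered s, as both programs produce it (rows listed top-down = j ascending)
def diagL (matrix : List String) (s : Nat) : List Char :=
  ((List.range matrix.length).reverse.filter (ps ((matrix.headD "").toList.length) s)).map
    (fun i => chAt matrix i (s - i))

theorem chAt_eq (matrix : List String) (i j : Nat) (hi : i < matrix.length)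
    (hc : ∀ r ∈ matrix, (matrix.headD "").toList.length ≤ r.toList.length)
    (hj : j < (matrix.headD "").toList.length) :
    ((PySem.List.pyGet? matrix (i : Int)).bind
        (fun row => PySem.Str.pyGet? row (j : Int))).getD ' ' = chAt matrix i j := by
  have hm : matrix[i] ∈ matrix := List.getElem_mem hi
  have hlen : j < matrix[i].toList.length := lt_of_lt_of_le hj (hc _ hm)
  simp [chAt, PySem.List.pyGet?_natCast, List.getElem?_eq_getElem hi,
    List.getD_eq_getElem?_getD, List.getElem?_eq_getElem hlen]

theorem walkA_eq (matrix : List String)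
    (hc : ∀ r ∈ matrix, (matrix.headD "").toList.length ≤ r.toList.length)
    (n s : Nat) (hn : n ≤ matrix.length) (hs : n ≤ s + 1) :
    walkA matrix ((n : Int) - 1) ((s : Int) - ((n : Int) - 1)) =
      ((List.range n).reverse.filter (ps ((matrix.headD "").toList.length) s)).map
        (fun i => chAt matrix i (s - i)) := by
  induction n with
  | zero =>
      rw [walkA, dif_neg]
      · simp
      · simp only [is_valid_index, Bool.and_eq_true, decide_eq_true_eq]
        omega
  | succ n ih =>
      have e1 : ((n + 1 : Nat) : Int) - 1 = (n : Int) := by omega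
      have e2 : (s : Int) - ((n : Int)) = ((s - n : Nat) : Int) := by omega
      rw [e1, e2, walkA]
      by_cases hv : s - n < (matrix.headD "").toList.length
      · have hg : is_valid_index (n : Int) ((s - n : Nat) : Int) matrix = true := by
          simp only [is_valid_index, Bool.and_eq_true, decide_eq_true_eq]
          omega
        rw [dif_pos hg]
        have e4 : ((s - n : Nat) : Int) + 1 = (s : Int) - (((n : Nat) : Int) - 1) := by omega
        rw [e4, ih (by omega) (by omega), chAt_eq matrix n (s - n) (by omega) hc hv]
        have hps : ps ((matrix.headD "").toList.length) s n = true := by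
          simp only [ps, decide_eq_true_eq]
          omega
        have hrev : (List.range (n + 1)).reverse = n :: (List.range n).reverse := by
          simp [List.range_succ]
        rw [hrev, List.filter_cons, hps, if_pos rfl, List.map_cons]
      · rw [dif_neg]
        · rw [List.filter_eq_nil_iff.mpr, List.map_nil]
          intro a ha
          rw [List.mem_reverse, List.mem_range] at ha
          simp only [ps, decide_eq_true_eq]
          omega
        · simp only [is_valid_index, Bool.and_eq_true, decide_eq_true_eq]
          omega

theorem drop_high (cols m s : Nat) (h : s < m) :
    (List.range m).reverse.filter (ps cols s) = (List.range (s + 1)).reverse.filter (ps cols s) := by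
  induction m with
  | zero => omega
  | succ m ih =>
      by_cases hm : s < m
      · have hf : ps cols s m = false := by simp [ps]; omega
        rw [List.range_succ, List.reverse_append]
        simp only [List.reverse_cons, List.reverse_nil, List.nil_append, List.cons_append,
          List.filter_cons, hf]
        exact ih hm
      · have : m = s := by omega
        subst this
        rfl

theorem A_eq (matrix : List String) (hpre : Pre_to_asc_diagonals matrix) :
    to_asc_diagonals matrix =
      (List.range (matrix.length + ((matrix.headD "").toList.length - 1))).map
        (fun s => String.ofList (diagL matrix s)) := by
  obtain ⟨hne, hc⟩ := hpre
  unfold to_asc_diagonals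
  dsimp only
  rw [PySem.List.pyRange_one]
  rw [show (((matrix.headD "").toList.length : Int) - 1).toNat
        = (matrix.headD "").toList.length - 1 from by omega]
  have h1 : (List.range matrix.length).map (fun i_idx : Nat => walkA matrix (i_idx : Int) 0) =
      (List.range matrix.length).map (fun s => diagL matrix s) := by
    apply List.map_congr_left
    intro k hk
    rw [List.mem_range] at hk
    have e1 : (k : Int) = ((k + 1 : Nat) : Int) - 1 := by omega
    have e2 : (0 : Int) = (k : Int) - (((k + 1 : Nat) : Int) - 1) := by omega
    rw [e1, e2, walkA_eq matrix hc (k + 1) k (by omega) (by omega)]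
    unfold diagL
    rw [drop_high _ _ _ hk]
  have h2 : ((List.range ((matrix.headD "").toList.length - 1)).map
        (fun k : Nat => (1 : Int) + (k : Int))).map
        (fun j_idx : Int => walkA matrix ((matrix.length : Int) - 1) j_idx) =
      (List.range ((matrix.headD "").toList.length - 1)).map
        (fun t => diagL matrix (matrix.length + t)) := by
    rw [List.map_map]
    apply List.map_congr_left
    intro t ht
    rw [List.mem_range] at ht
    simp only [Function.comp]
    have e2 : (1 : Int) + (t : Int)
        = ((matrix.length + t : Nat) : Int) - (((matrix.length : Nat) : Int) - 1) := by
      push_cast; ring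
    rw [e2, walkA_eq matrix hc matrix.length (matrix.length + t) (by omega) (by omega)]
    rfl
  rw [h1, h2]
  rw [List.range_add, List.map_append, List.map_append, List.map_map, List.map_map, List.map_map]
  rfl

theorem foldG (ops : List (Nat × Char)) (init : List (List Char)) (s : Nat) :
    (ops.foldl (fun bs p => bs.modify p.1 (fun b => b ++ [p.2])) init)[s]? =
      (init[s]?).map (fun b => b ++ (ops.filter (fun p => p.1 = s)).map Prod.snd) := by
  induction ops generalizing init with
  | nil => cases h : init[s]? <;> simp [h]
  | cons p ops ih =>
      obtain ⟨k, c⟩ := p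
      simp only [List.foldl_cons]
      rw [ih, List.getElem?_modify]
      by_cases hk : k = s
      · subst hk
        cases init[k]? <;> simp
      · cases init[s]? <;> simp [hk]

theorem range_filter_eq (cols i s : Nat) :
    (List.range cols).filter (fun j => decide (i + j = s)) =
      if i ≤ s ∧ s - i < cols then [s - i] else [] := by
  induction cols with
  | zero => rw [if_neg (by omega)]; rfl
  | succ c ih =>
      rw [List.range_succ, List.filter_append, ih]
      by_cases h1 : i ≤ s ∧ s - i < c
      · rw [if_pos h1, if_pos (by omega)]
        have : (decide (i + c = s)) = false := by simp; omega
        simp [this]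
      · rw [if_neg h1]
        by_cases h2 : i + c = s
        · rw [if_pos (by omega)]
          have : (decide (i + c = s)) = true := by simp; omega
          simp [this]
          omega
        · rw [if_neg (by omega)]
          have : (decide (i + c = s)) = false := by simp; omega
          simp [this]

theorem flatMap_if_singleton {α β : Type} (l : List α) (p : α → Bool) (f : α → β) :
    (l.flatMap (fun i => if p i then [f i] else [])) = (l.filter p).map f := by
  induction l with
  | nil => rfl
  | cons a l ih =>
      by_cases h : p a = true <;>
        simp [List.flatMap_cons, h, ih]

theorem foldl_flatMap' {α β γ : Type} (l : List α) (g : α → List β) (step : γ → β → γ) (init : γ) :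
    ((l.flatMap g).foldl step init) = l.foldl (fun acc a => (g a).foldl step acc) init := by
  induction l generalizing init with
  | nil => rfl
  | cons a l ih => simp [List.flatMap_cons, List.foldl_append, ih]

theorem filter_flatMap' {α β : Type} (l : List α) (g : α → List β) (p : β → Bool) :
    ((l.flatMap g).filter p) = l.flatMap (fun a => (g a).filter p) := by
  induction l with
  | nil => rfl
  | cons a l ih => simp [List.flatMap_cons, List.filter_append, ih]

theorem nest_eq (matrix : List String) (init : List (List Char)) :
    List.foldl
      (fun x (y : Nat) =>
        List.foldl
          (fun x2 (y1 : Nat) =>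
            x2.modify (y + y1) (fun b => b ++ [(matrix.getD y "").toList.getD y1 ' ']))
          x (List.range ((matrix.headD "").toList.length)))
      init (List.range matrix.length).reverse
    = List.foldl (fun bs p => bs.modify p.1 (fun b => b ++ [p.2])) init
        ((List.range matrix.length).reverse.flatMap
          (fun i => (List.range ((matrix.headD "").toList.length)).map
            (fun j => (i + j, chAt matrix i j)))) := by
  rw [foldl_flatMap']
  congr 1
  funext acc a
  rw [List.foldl_map]
  congr 1

theorem opsAll_filter (matrix : List String) (s : Nat) :
    (((List.range matrix.length).reverse.flatMap
        (fun i => (List.range ((matrix.headD "").toList.length)).map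
          (fun j => (i + j, chAt matrix i j)))).filter
      (fun p => decide (p.1 = s))).map Prod.snd = diagL matrix s := by
  rw [filter_flatMap', List.map_flatMap]
  unfold diagL
  rw [← flatMap_if_singleton ((List.range matrix.length).reverse)
        (ps ((matrix.headD "").toList.length) s) (fun i => chAt matrix i (s - i))]
  congr 1
  funext i
  rw [List.filter_map]
  rw [show ((fun p : Nat × Char => decide (p.1 = s))
        ∘ (fun j => (i + j, chAt matrix i j))) = fun j => decide (i + j = s) from rfl]
  rw [range_filter_eq]
  by_cases h : i ≤ s ∧ s - i < (matrix.headD "").toList.length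
  · have hps : ps ((matrix.headD "").toList.length) s i = true := by
      simp only [ps, decide_eq_true_eq]; omega
    rw [if_pos h, hps, if_pos rfl]
    simp
  · have hps : ps ((matrix.headD "").toList.length) s i = false := by
      simp only [ps, decide_eq_false_iff_not]; omega
    rw [if_neg h, hps]
    simp

theorem B_eq (matrix : List String) (hpre : Pre_to_asc_diagonals matrix) :
    to_asc_diagonals_alt matrix =
      (List.range (matrix.length + ((matrix.headD "").toList.length - 1))).map
        (fun s => String.ofList (diagL matrix s)) := by
  obtain ⟨hne, hc⟩ := hpre
  unfold to_asc_diagonals_alt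
  dsimp only
  have hr : PySem.List.pyRange ((matrix.length : Int) - 1) (-1) (-1)
      = ((List.range matrix.length).map (fun k : Nat => (k : Int))).reverse := by
    rw [PySem.List.pyRange_neg_one_eq_reverse,
        show (-1 : Int) + 1 = 0 from by norm_num,
        show (matrix.length : Int) - 1 + 1 = (matrix.length : Int) from by ring,
        PySem.List.pyRange_one]
    simp
  have hr2 : PySem.List.pyRange 0 (((matrix.headD "").toList.length : Int)) 1
      = (List.range ((matrix.headD "").toList.length)).map (fun k : Nat => (k : Int)) := by
    rw [PySem.List.pyRange_one]
    simp
  rw [hr, hr2, ← List.map_reverse, List.foldl_map]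
  simp only [List.foldl_map, PySem.List.pyGetD_natCast, PySem.Str.pyGet?_natCast,
    ← Nat.cast_add, Int.toNat_natCast, ← List.getD_eq_getElem?_getD]
  rw [nest_eq]
  apply List.ext_getElem?
  intro s
  rw [List.getElem?_map, List.getElem?_map, foldG, List.getElem?_replicate]
  by_cases hs : s < matrix.length + ((matrix.headD "").toList.length - 1)
  · rw [if_pos hs, List.getElem?_range hs]
    simp only [Option.map_some, List.nil_append]
    rw [opsAll_filter matrix s]
  · rw [if_neg hs]
    have hnone : (List.range (matrix.length + ((matrix.headD "").toList.length - 1)))[s]? = none :=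
      List.getElem?_eq_none (by simp only [List.length_range]; omega)
    rw [hnone]
    rfl

-- ===== VERDICT (by name: the statement is the Claim_ definition above) =====
theorem to_asc_diagonals_spec : Claim_equal_to_asc_diagonals := by
  intro matrix _ hpre
  unfold Spec_to_asc_diagonals
  rw [A_eq matrix hpre, B_eq matrix hpre]
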